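-- pv_equiv track=rewrite | github.com/mrWheel/kicad_localizer | kicad_localizer/__init__.py | extractDirectChildBlocks
-- ===== SOURCE A (Python) =====
-- def findBalancedBlock(content, start_index):
--   depth = 0
--   for i in range(start_index, len(content)):
--     ch = content[i]
--     if ch == "(":
--       depth += 1
--     elif ch == ")":
--       depth -= 1
--       if depth == 0:
--         return content[start_index:i + 1]
--   return None
--
-- def extractDirectChildBlocks(root_block, token):
--   blocks = []
--   depth = 0
--   i = 0
--
--   while i < len(root_block):
--     ch = root_block[i]
--
--     if ch == "(":
--       if depth == 1 and root_block.startswith(token, i):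
--         block = findBalancedBlock(root_block, i)
--         if block is None:
--           break
--         blocks.append(block)
--         i += len(block)
--         continue
--
--       depth += 1
--       i += 1
--       continue
--
--     if ch == ")":
--       depth -= 1
--
--     i += 1
--
--   return blocks
-- ===== SOURCE B (Python) =====
-- def extractDirectChildBlocks(root_block, token):
--   # One pass: record the (start, end) span of every direct child (a '(' seen at
--   # depth 1, closed when the raw-paren depth returns to 1), then keep the spans
--   # whose position matches the token and slice them out.
--   spans = []
--   depth = 0
--   start = None
--   for i, ch in enumerate(root_block):
--     if ch == "(":
--       if depth == 1:
--         start = i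
--       depth += 1
--     elif ch == ")":
--       depth -= 1
--       if depth == 1 and start is not None:
--         spans.append((start, i + 1))
--         start = None
--   return [root_block[a:b] for (a, b) in spans if root_block.startswith(token, a)]
-- ===== Notes on version B (the rewrite author's own statement) =====
-- stated objective: simpler
-- what changed: B replaces A's index-jumping while loop with its findBalancedBlock rescan helper by a single for-each pass that records the (start,end) span of every direct child via one depth counter, then filters and slices the spans in a final comprehension.
import Mathlib
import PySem

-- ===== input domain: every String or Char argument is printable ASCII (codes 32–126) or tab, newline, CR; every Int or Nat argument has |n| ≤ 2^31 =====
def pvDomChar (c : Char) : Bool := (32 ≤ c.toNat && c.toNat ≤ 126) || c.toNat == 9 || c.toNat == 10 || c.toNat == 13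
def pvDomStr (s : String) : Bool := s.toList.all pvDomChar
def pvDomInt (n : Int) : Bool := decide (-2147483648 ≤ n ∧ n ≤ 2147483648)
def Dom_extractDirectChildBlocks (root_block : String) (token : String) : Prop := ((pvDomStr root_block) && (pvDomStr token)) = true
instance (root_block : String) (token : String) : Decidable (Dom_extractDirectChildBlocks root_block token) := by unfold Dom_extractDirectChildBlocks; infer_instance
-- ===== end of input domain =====

-- B replaces A's index-jumping scan (with its findBalancedBlock rescan helper) by a single
-- for-each pass collecting the spans of all direct children, filtered and sliced at the end.

-- ===== PORT A =====
-- the 'for i in range(start_index, len(content))' loop of findBalancedBlock; depth as in Python.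
-- fuel is a structural totality guard only: one unit per loop iteration, always sufficient at the
-- call below (the Python loop runs at most len(content) - start_index times).
def fbbGo (cs : List Char) : Nat → Nat → Int → Option Nat
  | 0, _, _ => none
  | fuel + 1, i, depth =>
    if h : i < cs.length then
      if cs[i] = '(' then fbbGo cs fuel (i + 1) (depth + 1)
      else if cs[i] = ')' then
        if depth - 1 = 0 then some i            -- Python returns content[start_index:i+1]
        else fbbGo cs fuel (i + 1) (depth - 1)
      else fbbGo cs fuel (i + 1) depth
    else none

-- Python's findBalancedBlock(content, start_index): returns the index k of the closing paren;
-- the Python return value is the slice content[start_index:k+1], recovered at the call site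
-- (and len(block) = k+1-start_index, so 'i += len(block)' sets i to k+1).
def findBalancedBlock (content : List Char) (start_index : Nat) : Option Nat :=
  fbbGo content (content.length + 1 - start_index) start_index 0

-- the while loop of extractDirectChildBlocks (fuel: one unit per iteration, i strictly increases,
-- so len+1 units always suffice); root_block.startswith(token, i) is exact as
-- PySem.Chars.startswith on the slice root_block[i:] since 0 ≤ i < len(root_block) here
def aLoop (cs tok : List Char) : Nat → List String → Int → Nat → List String
  | 0, blocks, _, _ => blocks
  | fuel + 1, blocks, depth, i =>
    if h : i < cs.length then
      if cs[i] = '(' then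
        if depth = 1 ∧ PySem.Chars.startswith (PySem.List.slice cs (some (i : Int)) none) tok = true then
          match findBalancedBlock cs i with
          | none => blocks          -- break
          | some k =>
              aLoop cs tok fuel (blocks ++ [String.ofList (PySem.List.slice cs (some (i : Int)) (some ((k : Int) + 1)))]) depth (k + 1)
        else aLoop cs tok fuel blocks (depth + 1) (i + 1)
      else if cs[i] = ')' then aLoop cs tok fuel blocks (depth - 1) (i + 1)
      else aLoop cs tok fuel blocks depth (i + 1)
    else blocks

def extractDirectChildBlocks (root_block : String) (token : String) : List String :=
  aLoop root_block.toList token.toList (root_block.toList.length + 1) [] 0 0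

-- ===== PORT B =====
-- loop body of Source B: state (depth, start, spans), input (i, ch) from enumerate(root_block)
def bStep (st : Int × Option Int × List (Int × Int)) (ich : Int × Char) :
    Int × Option Int × List (Int × Int) :=
  match st, ich with
  | (depth, start, spans), (i, ch) =>
    if ch = '(' then
      (depth + 1, if depth = 1 then some i else start, spans)
    else if ch = ')' then
      match start with
      | some a => if depth - 1 = 1 then (depth - 1, none, spans ++ [(a, i + 1)]) else (depth - 1, some a, spans)
      | none => (depth - 1, none, spans)
    else (depth, start, spans)

-- Source B's final comprehension: root_block.startswith(token, a) is exact as startswith on the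
-- slice root_block[a:] (every recorded a satisfies 0 ≤ a < len(root_block))
def bPost (cs tok : List Char) (spans : List (Int × Int)) : List String :=
  (spans.filter (fun ab => PySem.Chars.startswith (PySem.List.slice cs (some ab.1) none) tok)).map
    (fun ab => String.ofList (PySem.List.slice cs (some ab.1) (some ab.2)))

def extractDirectChildBlocks_alt (root_block : String) (token : String) : List String :=
  let cs := root_block.toList
  let fin := (PySem.List.enumerate cs 0).foldl bStep (0, none, [])
  bPost cs token.toList fin.2.2

-- ===== PRECONDITION & SPEC =====
def Spec_extractDirectChildBlocks (root_block : String) (token : String) (out : List String) : Prop := out = extractDirectChildBlocks_alt root_block token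
instance (root_block : String) (token : String) (out : List String) : Decidable (Spec_extractDirectChildBlocks root_block token out) := by unfold Spec_extractDirectChildBlocks; infer_instance

-- ===== CLAIM (what is proved, stated in full; the proofs are below) =====
def Claim_equal_extractDirectChildBlocks : Prop := ∀ (root_block : String) (token : String), Dom_extractDirectChildBlocks root_block token → Spec_extractDirectChildBlocks root_block token (extractDirectChildBlocks root_block token)

-- ===== LEMMAS AND PROOFS =====

-- bStep only ever appends to the span list
theorem bStep_spans (d : Int) (st : Option Int) (sp : List (Int × Int)) (x : Int × Char) :
    bStep (d, st, sp) x =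
      ((bStep (d, st, []) x).1, (bStep (d, st, []) x).2.1, sp ++ (bStep (d, st, []) x).2.2) := by
  obtain ⟨i, ch⟩ := x
  cases st <;> simp only [bStep] <;> split_ifs <;> simp

theorem foldl_bStep_spans (l : List (Int × Char)) (d : Int) (st : Option Int) (sp : List (Int × Int)) :
    l.foldl bStep (d, st, sp) =
      ((l.foldl bStep (d, st, [])).1, (l.foldl bStep (d, st, [])).2.1,
        sp ++ (l.foldl bStep (d, st, [])).2.2) := by
  induction l generalizing d st sp with
  | nil => simp
  | cons x t ih =>
      simp only [List.foldl_cons]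
      rw [bStep_spans]
      rw [ih, ih (bStep (d, st, []) x).1 (bStep (d, st, []) x).2.1 (bStep (d, st, []) x).2.2]
      simp [List.append_assoc]

theorem bPost_append (cs tok : List Char) (s1 s2 : List (Int × Int)) :
    bPost cs tok (s1 ++ s2) = bPost cs tok s1 ++ bPost cs tok s2 := by
  simp [bPost, List.filter_append]

-- helper: fbbGo only reports a closing index at or after its scan position, inside the string
theorem fbbGo_bounds (cs : List Char) (fuel i : Nat) (depth : Int) (k : Nat)
    (h : fbbGo cs fuel i depth = some k) : i ≤ k ∧ k < cs.length := by
  fun_induction fbbGo cs fuel i depth with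
  | case1 i depth => exact absurd h (by simp)
  | case2 fuel i depth h1 h2 ih => exact ⟨Nat.le_of_succ_le (ih h).1, (ih h).2⟩
  | case3 fuel i depth h1 h2 h3 h4 => simp only [Option.some_inj] at h; omega
  | case4 fuel i depth h1 h2 h3 h4 ih => exact ⟨Nat.le_of_succ_le (ih h).1, (ih h).2⟩
  | case5 fuel i depth h1 h2 h3 ih => exact ⟨Nat.le_of_succ_le (ih h).1, (ih h).2⟩
  | case6 fuel i depth h1 => exact absurd h (by simp)

-- while A consumes a matched balanced child in one jump, B's fold walks through it,
-- keeping the open span, and closes it exactly at the child's closing paren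
theorem bFold_balanced (cs : List Char) (fuel j : Nat) (dF : Int) (k : Nat)
    (hfb : fbbGo cs fuel j dF = some k) (hd : 1 ≤ dF) :
    ∀ (a : Int) (sp : List (Int × Int)),
      (PySem.List.enumerate (cs.drop j) (j : Int)).foldl bStep (dF + 1, some a, sp) =
      (PySem.List.enumerate (cs.drop (k + 1)) ((k : Int) + 1)).foldl bStep
        (1, none, sp ++ [(a, (k : Int) + 1)]) := by
  fun_induction fbbGo cs fuel j dF with
  | case1 j dF => exact absurd hfb (by simp)
  | case2 fuel j dF h1 h2 ih =>
      intro a sp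
      rw [List.drop_eq_getElem_cons h1, PySem.List.enumerate_cons, List.foldl_cons]
      have hb : bStep (dF + 1, some a, sp) ((j : Int), cs[j]) = (dF + 1 + 1, some a, sp) := by
        simp [bStep, h2, show ¬(dF + 1 = 1) by omega]
      rw [hb]
      have := ih hfb (by omega) a sp
      simpa using this
  | case3 fuel j dF h1 h2 h3 h4 =>
      intro a sp
      simp only [Option.some_inj] at hfb
      subst hfb
      rw [List.drop_eq_getElem_cons h1, PySem.List.enumerate_cons, List.foldl_cons]
      have hdF : dF = 1 := by omega
      have hb : bStep (dF + 1, some a, sp) ((j : Int), cs[j]) =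
          (1, none, sp ++ [(a, (j : Int) + 1)]) := by
        simp [bStep, h3, hdF]
      rw [hb]
  | case4 fuel j dF h1 h2 h3 h4 ih =>
      intro a sp
      rw [List.drop_eq_getElem_cons h1, PySem.List.enumerate_cons, List.foldl_cons]
      have hb : bStep (dF + 1, some a, sp) ((j : Int), cs[j]) = (dF - 1 + 1, some a, sp) := by
        simp [bStep, h3, show ¬(dF = 1) by omega]
      rw [hb]
      have := ih hfb (by omega) a sp
      simpa using this
  | case5 fuel j dF h1 h2 h3 ih =>
      intro a sp
      rw [List.drop_eq_getElem_cons h1, PySem.List.enumerate_cons, List.foldl_cons]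
      have hb : bStep (dF + 1, some a, sp) ((j : Int), cs[j]) = (dF + 1, some a, sp) := by
        simp [bStep, h2, h3]
      rw [hb]
      have := ih hfb hd a sp
      simpa using this
  | case6 fuel j dF h1 => exact absurd hfb (by simp)

-- when no balanced end exists (and fuel covers the whole remaining scan, as it always does at the
-- call sites), B's fold never closes the span: no span is ever recorded
theorem bFold_unbalanced (cs : List Char) (fuel j : Nat) (dF : Int)
    (hfb : fbbGo cs fuel j dF = none) (hd : 1 ≤ dF) (hfuel : cs.length ≤ fuel + j) :
    ∀ (a : Int) (sp : List (Int × Int)),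
      ((PySem.List.enumerate (cs.drop j) (j : Int)).foldl bStep (dF + 1, some a, sp)).2.2 = sp := by
  fun_induction fbbGo cs fuel j dF with
  | case1 j dF =>
      intro a sp
      have hnil : cs.drop j = [] := List.drop_eq_nil_of_le (by omega)
      simp [hnil, PySem.List.enumerate_nil]
  | case2 fuel j dF h1 h2 ih =>
      intro a sp
      rw [List.drop_eq_getElem_cons h1, PySem.List.enumerate_cons, List.foldl_cons]
      have hb : bStep (dF + 1, some a, sp) ((j : Int), cs[j]) = (dF + 1 + 1, some a, sp) := by
        simp [bStep, h2, show ¬(dF + 1 = 1) by omega]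
      rw [hb]
      have := ih hfb (by omega) (by omega) a sp
      simpa using this
  | case3 fuel j dF h1 h2 h3 h4 => simp at hfb
  | case4 fuel j dF h1 h2 h3 h4 ih =>
      intro a sp
      rw [List.drop_eq_getElem_cons h1, PySem.List.enumerate_cons, List.foldl_cons]
      have hb : bStep (dF + 1, some a, sp) ((j : Int), cs[j]) = (dF - 1 + 1, some a, sp) := by
        simp [bStep, h3, show ¬(dF = 1) by omega]
      rw [hb]
      have := ih hfb (by omega) (by omega) a sp
      simpa using this
  | case5 fuel j dF h1 h2 h3 ih =>
      intro a sp
      rw [List.drop_eq_getElem_cons h1, PySem.List.enumerate_cons, List.foldl_cons]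
      have hb : bStep (dF + 1, some a, sp) ((j : Int), cs[j]) = (dF + 1, some a, sp) := by
        simp [bStep, h2, h3]
      rw [hb]
      have := ih hfb hd (by omega) a sp
      simpa using this
  | case6 fuel j dF h1 =>
      intro a sp
      have hnil : cs.drop j = [] := List.drop_eq_nil_of_le (by omega)
      simp [hnil, PySem.List.enumerate_nil]

-- the coupling invariant between A's scan state and B's fold state
def bInv (cs tok : List Char) (depth : Int) (start : Option Int) : Prop :=
  start = none ∨
    ∃ a : Nat, start = some (a : Int) ∧ 2 ≤ depth ∧
      PySem.Chars.startswith (PySem.List.slice cs (some (a : Int)) none) tok = false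

theorem aLoop_eq_bFold (cs tok : List Char) (fuel : Nat) (blocks : List String) (depth : Int) (i : Nat) :
    ∀ (start : Option Int), cs.length ≤ fuel + i → bInv cs tok depth start →
      aLoop cs tok fuel blocks depth i =
        blocks ++ bPost cs tok
          (((PySem.List.enumerate (cs.drop i) (i : Int)).foldl bStep (depth, start, [])).2.2) := by
  fun_induction aLoop cs tok fuel blocks depth i with
  | case1 blocks depth i =>
      -- fuel 0: only reachable with i ≥ len, where the Python loop has ended anyway
      intro start hfuel hInv
      have hnil : cs.drop i = [] := List.drop_eq_nil_of_le (by omega)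
      simp [hnil, PySem.List.enumerate_nil, bPost]
  | case2 fuel blocks depth i h hpo hcond hfb =>
      -- matched child, unbalanced: A breaks; B never records a span
      intro start hfuel hInv
      have hstart : start = none := by
        rcases hInv with h0 | ⟨a, ha, hd2, _⟩
        · exact h0
        · exact absurd hcond.1 (by omega)
      subst hstart
      rw [List.drop_eq_getElem_cons h, PySem.List.enumerate_cons, List.foldl_cons]
      have hb : bStep (depth, none, []) ((i : Int), cs[i]) = (1 + 1, some (i : Int), []) := by
        simp [bStep, hpo, hcond.1]
      rw [hb]
      have hm : cs.length + 1 - i = (cs.length - i) + 1 := by omega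
      rw [findBalancedBlock, hm, fbbGo] at hfb
      simp only [h, dif_pos, hpo, if_pos, zero_add] at hfb
      rw [show ((i : Int) + 1) = ((i + 1 : Nat) : Int) by push_cast; ring]
      rw [bFold_unbalanced cs (cs.length - i) (i + 1) 1 hfb (by omega) (by omega) (i : Int) []]
      simp [bPost]
  | case3 fuel blocks depth i h hpo hcond k hfb ih =>
      -- matched child, balanced: A jumps over the block; B closes the span at its end
      intro start hfuel hInv
      have hstart : start = none := by
        rcases hInv with h0 | ⟨a, ha, hd2, _⟩
        · exact h0
        · exact absurd hcond.1 (by omega)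
      subst hstart
      rw [List.drop_eq_getElem_cons h, PySem.List.enumerate_cons, List.foldl_cons]
      have hb : bStep (depth, none, []) ((i : Int), cs[i]) = (1 + 1, some (i : Int), []) := by
        simp [bStep, hpo, hcond.1]
      rw [hb]
      have hm : cs.length + 1 - i = (cs.length - i) + 1 := by omega
      rw [findBalancedBlock, hm, fbbGo] at hfb
      simp only [h, dif_pos, hpo, if_pos, zero_add] at hfb
      have hk := fbbGo_bounds cs (cs.length - i) (i + 1) 1 k hfb
      rw [show ((i : Int) + 1) = ((i + 1 : Nat) : Int) by push_cast; ring]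
      rw [bFold_balanced cs (cs.length - i) (i + 1) 1 k hfb (by omega) (i : Int) []]
      rw [foldl_bStep_spans]
      rw [hcond.1] at ih ⊢
      have ih' := ih none (by omega) (Or.inl rfl)
      push_cast at ih' ⊢
      rw [ih']
      rw [bPost_append]
      have hsingle : bPost cs tok [((i : Int), (k : Int) + 1)] =
          [String.ofList (PySem.List.slice cs (some (i : Int)) (some ((k : Int) + 1)))] := by
        have hsw' : PySem.Chars.startswith (List.drop i cs) tok = true := by
          simpa using hcond.2
        unfold bPost
        rw [List.filter_singleton]
        simp [hsw']
      rw [List.nil_append, hsingle]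
      simp [List.append_assoc]
  | case4 fuel blocks depth i h hpo hcond ih =>
      -- an opening paren that does not start a matching child
      intro start hfuel hInv
      rw [List.drop_eq_getElem_cons h, PySem.List.enumerate_cons, List.foldl_cons]
      by_cases hd1 : depth = 1
      · have hstart : start = none := by
          rcases hInv with h0 | ⟨a, ha, hd2, _⟩
          · exact h0
          · exact absurd hd1 (by omega)
        subst hstart
        have hsw : PySem.Chars.startswith (PySem.List.slice cs (some (i : Int)) none) tok = false := by
          rcases Bool.eq_false_or_eq_true
              (PySem.Chars.startswith (PySem.List.slice cs (some (i : Int)) none) tok) with h0 | h0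
          · exact absurd ⟨hd1, h0⟩ hcond
          · exact h0
        have hb : bStep (depth, none, []) ((i : Int), cs[i]) = (depth + 1, some (i : Int), []) := by
          simp [bStep, hpo, hd1]
        rw [hb]
        exact ih (some (i : Int)) (by omega) (Or.inr ⟨i, rfl, by omega, hsw⟩)
      · have hb : bStep (depth, start, []) ((i : Int), cs[i]) = (depth + 1, start, []) := by
          simp [bStep, hpo, hd1]
        rw [hb]
        refine ih start (by omega) ?_
        rcases hInv with h0 | ⟨a, ha, hd2, hsw⟩
        · exact Or.inl h0
        · exact Or.inr ⟨a, ha, by omega, hsw⟩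
  | case5 fuel blocks depth i h hpo hpc ih =>
      -- a closing paren
      intro start hfuel hInv
      rw [List.drop_eq_getElem_cons h, PySem.List.enumerate_cons, List.foldl_cons]
      rcases hInv with h0 | ⟨a, ha, hd2, hsw⟩
      · subst h0
        have hb : bStep (depth, none, []) ((i : Int), cs[i]) = (depth - 1, none, []) := by
          simp [bStep, hpc]
        rw [hb]
        exact ih none (by omega) (Or.inl rfl)
      · subst ha
        by_cases hd1 : depth - 1 = 1
        · have hb : bStep (depth, some (a : Int), []) ((i : Int), cs[i]) =
              (depth - 1, none, [((a : Int), (i : Int) + 1)]) := by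
            simp [bStep, hpc, hd1]
          rw [hb]
          rw [foldl_bStep_spans]
          rw [ih none (by omega) (Or.inl rfl)]
          rw [bPost_append]
          have hnone : bPost cs tok [((a : Int), (i : Int) + 1)] = [] := by
            simp [bPost]
            simpa using hsw
          rw [hnone]
          simp
        · have hb : bStep (depth, some (a : Int), []) ((i : Int), cs[i]) =
              (depth - 1, some (a : Int), []) := by
            simp [bStep, hpc, hd1]
          rw [hb]
          exact ih (some (a : Int)) (by omega) (Or.inr ⟨a, rfl, by omega, hsw⟩)
  | case6 fuel blocks depth i h hpo hpc ih =>
      -- any other character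
      intro start hfuel hInv
      rw [List.drop_eq_getElem_cons h, PySem.List.enumerate_cons, List.foldl_cons]
      have hb : bStep (depth, start, []) ((i : Int), cs[i]) = (depth, start, []) := by
        simp [bStep, hpo, hpc]
      rw [hb]
      exact ih start (by omega) hInv
  | case7 fuel blocks depth i h =>
      intro start hfuel hInv
      have hnil : cs.drop i = [] := List.drop_eq_nil_of_le (by omega)
      simp [hnil, PySem.List.enumerate_nil, bPost]

-- ===== VERDICT (by name: the statement is the Claim_ definition above) =====
theorem extractDirectChildBlocks_spec : Claim_equal_extractDirectChildBlocks := by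
  intro root_block token _
  unfold Spec_extractDirectChildBlocks extractDirectChildBlocks extractDirectChildBlocks_alt
  have h := aLoop_eq_bFold root_block.toList token.toList (root_block.toList.length + 1) [] 0 0
      none (by omega) (Or.inl rfl)
  simpa using h
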